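-- pv_equiv track=rewrite | github.com/tlammi/kratos | kratos/unit/web/test_wshandler.py | match_dicts
-- ===== SOURCE A (Python) =====
-- def match_dicts(dict_in: dict, filter: dict):
--     try:
--         for key, value in filter.items():
--             if isinstance(value, dict):
--                 if not match_dicts(dict_in[key], value):
--                     return False
--             elif dict_in[key] != value:
--                 return False
--     except KeyError:
--         return False
--     return True
-- ===== SOURCE B (Python) =====
-- def match_dicts(dict_in: dict, filter: dict):
--     # For the flat str->str dicts in scope (values are strings, never nested
--     # dicts), a filter matches exactly when every (key, value) item of the
--     # filter is also an item of dict_in: a set-subset test on the items views.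
--     return filter.items() <= dict_in.items()
-- ===== Notes on version B (the rewrite author's own statement) =====
-- stated objective: idiomatic
-- what changed: Replaces the explicit loop with per-key lookups and try/except KeyError by a single set-subset comparison of the two items() views (filter.items() <= dict_in.items()).
import Mathlib
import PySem

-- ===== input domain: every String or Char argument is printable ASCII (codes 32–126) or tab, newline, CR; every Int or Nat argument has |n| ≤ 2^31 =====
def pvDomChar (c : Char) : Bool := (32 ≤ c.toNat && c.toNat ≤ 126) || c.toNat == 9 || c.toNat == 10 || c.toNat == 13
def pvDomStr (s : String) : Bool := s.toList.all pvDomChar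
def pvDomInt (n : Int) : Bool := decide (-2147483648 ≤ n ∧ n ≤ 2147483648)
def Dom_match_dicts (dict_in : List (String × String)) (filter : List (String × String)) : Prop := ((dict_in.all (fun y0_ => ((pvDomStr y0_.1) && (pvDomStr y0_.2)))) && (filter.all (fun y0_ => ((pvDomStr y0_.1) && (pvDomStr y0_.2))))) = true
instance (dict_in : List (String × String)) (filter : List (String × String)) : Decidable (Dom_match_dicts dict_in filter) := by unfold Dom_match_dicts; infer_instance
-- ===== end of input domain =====

-- B replaces A's per-key lookup loop with try/except by a set-subset test on the items views (idiomatic; same cost).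

-- ===== PORT A =====
-- A Python dict arrives as an association list; per the type convention its
-- lookup is FIRST match, so dict.items() is the list with later duplicate keys
-- dropped (first binding wins).  pyLookup?/pyItems implement exactly that.
def pyLookup? : List (String × String) → String → Option String
  | [], _ => none
  | (k, v) :: rest, key => if k == key then some v else pyLookup? rest key

def pyItemsAux (seen : List String) : List (String × String) → List (String × String)
  | [] => []
  | kv :: rest =>
      if kv.1 ∈ seen then pyItemsAux seen rest
      else kv :: pyItemsAux (kv.1 :: seen) rest

def pyItems (l : List (String × String)) : List (String × String) := pyItemsAux [] l

-- A's loop: for (key, value) in filter.items(): dict_in[key] must exist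
-- (KeyError → False) and equal value (values are strings here, so the
-- isinstance(value, dict) branch never fires); else continue; end → True.
def matchLoop (dict_in : List (String × String)) : List (String × String) → Bool
  | [] => true
  | (key, value) :: rest =>
      match pyLookup? dict_in key with
      | none => false            -- dict_in[key] raises KeyError → return False
      | some x => if x ≠ value then false else matchLoop dict_in rest

def match_dicts (dict_in : List (String × String)) (filter : List (String × String)) : Bool :=
  matchLoop dict_in (pyItems filter)

-- ===== PORT B =====
-- Source B: filter.items() <= dict_in.items()  — every item of filter is an item of dict_in.
def match_dicts_alt (dict_in : List (String × String)) (filter : List (String × String)) : Bool :=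
  (pyItems filter).all (fun kv => (pyItems dict_in).contains kv)

-- ===== PRECONDITION & SPEC =====
def Spec_match_dicts (dict_in : List (String × String)) (filter : List (String × String)) (out : Bool) : Prop := out = match_dicts_alt dict_in filter
instance (dict_in : List (String × String)) (filter : List (String × String)) (out : Bool) : Decidable (Spec_match_dicts dict_in filter out) := by unfold Spec_match_dicts; infer_instance

-- ===== CLAIM (what is proved, stated in full; the proofs are below) =====
def Claim_equal_match_dicts : Prop := ∀ (dict_in : List (String × String)) (filter : List (String × String)), Dom_match_dicts dict_in filter → Spec_match_dicts dict_in filter (match_dicts dict_in filter)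

-- ===== LEMMAS AND PROOFS =====

theorem keys_pyItemsAux_nodup_and_fresh (l : List (String × String)) :
    ∀ seen : List String, ((pyItemsAux seen l).map Prod.fst).Nodup ∧
      ∀ k ∈ (pyItemsAux seen l).map Prod.fst, k ∉ seen := by
  induction l with
  | nil => intro seen; simp [pyItemsAux]
  | cons kv rest ih =>
      intro seen
      by_cases h : kv.1 ∈ seen
      · simpa [pyItemsAux, h] using ih seen
      · obtain ⟨hn, hf⟩ := ih (kv.1 :: seen)
        refine ⟨?_, ?_⟩ <;> simp only [pyItemsAux, h, if_false, List.map_cons]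
        · refine List.nodup_cons.2 ⟨?_, hn⟩
          intro hmem
          exact (hf _ hmem) (by simp)
        · intro k hk
          rcases List.mem_cons.1 hk with rfl | hk
          · exact h
          · have := hf _ hk; intro hs; exact this (List.mem_cons_of_mem _ hs)

theorem pyLookup?_pyItemsAux (l : List (String × String)) :
    ∀ (seen : List String) (key : String), key ∉ seen →
      pyLookup? (pyItemsAux seen l) key = pyLookup? l key := by
  induction l with
  | nil => intro seen key _; rfl
  | cons kv rest ih =>
      intro seen key hk
      by_cases h : kv.1 ∈ seen
      · have hne : (kv.1 == key) = false := by
          simp only [beq_eq_false_iff_ne]; rintro rfl; exact hk h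
        simp [pyItemsAux, h, pyLookup?, hne, ih seen key hk]
      · by_cases he : kv.1 == key
        · simp [pyItemsAux, h, pyLookup?, he]
        · have hk' : key ∉ kv.1 :: seen := by
            intro hm
            rcases List.mem_cons.1 hm with rfl | hm
            · simp at he
            · exact hk hm
          simp [pyItemsAux, h, pyLookup?, he, ih (kv.1 :: seen) key hk']

theorem mem_iff_pyLookup?_of_nodup (l : List (String × String))
    (h : (l.map Prod.fst).Nodup) (k v : String) :
    (k, v) ∈ l ↔ pyLookup? l k = some v := by
  induction l with
  | nil => simp [pyLookup?]
  | cons kv rest ih =>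
      rw [List.map_cons, List.nodup_cons] at h
      obtain ⟨hk, hn⟩ := h
      by_cases he : kv.1 == k
      · have hek : kv.1 = k := by simpa using he
        constructor
        · intro hm
          rcases List.mem_cons.1 hm with hm | hm
          · simp [pyLookup?, ← hm]
          · exact absurd (by simpa [hek] using List.mem_map_of_mem (f := Prod.fst) hm)
              (by simpa [hek] using hk)
        · intro hl
          simp only [pyLookup?, he, if_true, Option.some.injEq] at hl
          exact List.mem_cons.2 (Or.inl (by cases kv; simp_all))
      · have hek : kv.1 ≠ k := by simpa using he
        constructor
        · intro hm
          rcases List.mem_cons.1 hm with hm | hm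
          · exact absurd (congrArg Prod.fst hm.symm) hek
          · simpa [pyLookup?, he] using (ih hn).1 hm
        · intro hl
          simp only [pyLookup?, he] at hl
          exact List.mem_cons.2 (Or.inr ((ih hn).2 hl))

theorem contains_eq_lookup (d : List (String × String)) (kv : String × String) :
    (pyItems d).contains kv = (pyLookup? d kv.1 == some kv.2) := by
  obtain ⟨k, v⟩ := kv
  have hnd := (keys_pyItemsAux_nodup_and_fresh d []).1
  have h1 : (k, v) ∈ pyItems d ↔ pyLookup? (pyItems d) k = some v :=
    mem_iff_pyLookup?_of_nodup _ hnd k v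
  have h2 : pyLookup? (pyItems d) k = pyLookup? d k :=
    pyLookup?_pyItemsAux d [] k (by simp)
  rw [h2] at h1
  by_cases h : pyLookup? d k = some v
  · simp [h1, h]
  · simp [h1, h]

theorem matchLoop_eq_all (dict_in : List (String × String)) (fl : List (String × String)) :
    matchLoop dict_in fl = fl.all (fun kv => pyLookup? dict_in kv.1 == some kv.2) := by
  induction fl with
  | nil => rfl
  | cons kv rest ih =>
      cases kv with
      | mk k v =>
        simp only [matchLoop, List.all_cons]
        cases h : pyLookup? dict_in k with
        | none => simp
        | some x =>
            by_cases hx : x = v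
            · simp [hx, ih]
            · simp [hx]


-- ===== VERDICT (by name: the statement is the Claim_ definition above) =====
theorem match_dicts_spec : Claim_equal_match_dicts := by
  intro dict_in filter _
  unfold Spec_match_dicts match_dicts match_dicts_alt
  rw [matchLoop_eq_all]
  simp only [contains_eq_lookup]
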